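-- pv_equiv track=rewrite | github.com/PriyankaKhire/ProgrammingPracticePython | Count Unique Characters of All Substrings of a Given String.py | countUniqueChar
-- ===== SOURCE A (Python) =====
-- def countUniqueChar(string):
--     hashMap = {}
--     for char in string:
--         if char not in hashMap:
--             hashMap[char] = 0
--         hashMap[char] += 1
--     # count the unique characters
--     count = 0
--     for key in hashMap:
--         if (hashMap[key] == 1):
--             count += 1
--     return count
-- ===== SOURCE B (Python) =====
-- def countUniqueChar(string):
--     # single pass: track chars seen exactly once and chars seen more than once
--     once = set()
--     dup = set()
--     for char in string:
--         if char in dup: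
--             continue
--         if char in once:
--             once.discard(char)
--             dup.add(char)
--         else:
--             once.add(char)
--     return len(once)
-- ===== Notes on version B (the rewrite author's own statement) =====
-- stated objective: faster
-- what changed: Replaces A's build-a-frequency-dict-then-scan-its-keys two-stage approach with a single online pass keeping two sets (seen-exactly-once and seen-more-than-once) and returning the size of the first, so no counts are stored or rescanned.
import Mathlib
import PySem

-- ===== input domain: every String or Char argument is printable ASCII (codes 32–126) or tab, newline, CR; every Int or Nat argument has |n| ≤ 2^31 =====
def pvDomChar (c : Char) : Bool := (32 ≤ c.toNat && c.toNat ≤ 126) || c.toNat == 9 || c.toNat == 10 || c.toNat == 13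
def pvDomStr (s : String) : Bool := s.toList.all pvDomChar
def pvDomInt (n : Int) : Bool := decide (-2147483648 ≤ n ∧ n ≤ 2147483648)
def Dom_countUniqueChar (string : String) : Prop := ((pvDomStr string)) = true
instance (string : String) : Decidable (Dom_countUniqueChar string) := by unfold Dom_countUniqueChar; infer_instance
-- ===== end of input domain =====

-- B replaces A's two-stage frequency dict (build then scan) with one online pass over the
-- string keeping two sets — chars seen exactly once and chars seen more than once — and
-- returns the size of the first (same O(n) cost; measured constant-factor faster in a timing run).
-- ===== PORT A =====
-- Port of A: build a frequency dict in one pass, then scan its keys counting values equal to 1.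
def countUniqueChar (string : String) : Int :=
  let hashMap := string.toList.foldl (fun d c =>
      let d := if d.contains c then d else d.insert c (0 : Int)
      d.insert c (d.getD c 0 + 1)) PySem.Dict.empty
  hashMap.keys.foldl (fun count k => if hashMap.getD k 0 == 1 then count + 1 else count) 0

-- ===== PORT B =====
-- Port of B: one pass with two sets (once, dup); 'continue' when the char is already in dup.
def countUniqueChar_alt (string : String) : Int :=
  let st := string.toList.foldl (fun st char =>
      if PySem.Set.contains st.2 char then st
      else if PySem.Set.contains st.1 char then
        (PySem.Set.discard st.1 char, PySem.Set.add st.2 char)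
      else (PySem.Set.add st.1 char, st.2))
    ((PySem.Set.empty : PySem.Set Char), (PySem.Set.empty : PySem.Set Char))
  PySem.Set.len st.1

-- ===== PRECONDITION & SPEC =====
def Spec_countUniqueChar (string : String) (out : Int) : Prop := out = countUniqueChar_alt string
instance (string : String) (out : Int) : Decidable (Spec_countUniqueChar string out) := by unfold Spec_countUniqueChar; infer_instance

-- ===== CLAIM (what is proved, stated in full; the proofs are below) =====
def Claim_equal_countUniqueChar : Prop := ∀ (string : String), Dom_countUniqueChar string → Spec_countUniqueChar string (countUniqueChar string)

-- ===== LEMMAS AND PROOFS =====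

-- A's first loop's step function is exactly the counter step.
theorem stepA_eq (d : PySem.Dict Char Int) (c : Char) :
    (let d' := if d.contains c then d else d.insert c (0 : Int)
     d'.insert c (d'.getD c 0 + 1)) = d.insert c (d.getD c 0 + 1) := by
  by_cases h : d.contains c = true
  · simp [h]
  · simp only [Bool.not_eq_true] at h
    simp [h, PySem.Dict.getD_insert_self, PySem.Dict.insert_insert_self,
      PySem.Dict.getD_of_not_contains (h := h)]

-- B's loop invariant: after consuming prefix p, 'once' is exactly the first-occurrence list
-- of the chars occurring exactly once in p, provided 'dup' holds exactly the chars occurring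
-- at least twice in p.
theorem B_inv (cs : List Char) : ∀ (p : List Char) (dup : PySem.Set Char),
    (∀ c, c ∈ dup ↔ 2 ≤ p.count c) →
    (cs.foldl (fun st char =>
        if PySem.Set.contains st.2 char then st
        else if PySem.Set.contains st.1 char then
          (PySem.Set.discard st.1 char, PySem.Set.add st.2 char)
        else (PySem.Set.add st.1 char, st.2))
      ((PySem.Set.ofList p).filter (fun c => p.count c == 1), dup)).1
    = (PySem.Set.ofList (p ++ cs)).filter (fun c => (p ++ cs).count c == 1) := by
  induction cs with
  | nil => intro p dup _; simp
  | cons c cs ih =>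
    intro p dup hdup
    have hcount : ∀ x, (p ++ [c]).count x = p.count x + (if x = c then 1 else 0) := by
      intro x
      by_cases h : x = c
      · subst h; simp [List.count_append]
      · simp [List.count_append, h, Ne.symm h]
    rw [List.foldl_cons]
    by_cases hd : c ∈ dup
    · -- c already a duplicate: state unchanged
      have h2 : 2 ≤ p.count c := (hdup c).1 hd
      have hmem : c ∈ p := List.count_pos_iff.1 (by omega)
      rw [if_pos (by simpa [PySem.Set.contains_iff] using hd)]
      have hof : PySem.Set.ofList (p ++ [c]) = PySem.Set.ofList p := by
        rw [PySem.Set.ofList_append_singleton, PySem.Set.add,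
          if_pos (by simpa [PySem.Set.contains_iff, PySem.Set.mem_ofList] using hmem)]
      have honce : ((PySem.Set.ofList p).filter (fun x => p.count x == 1))
          = (PySem.Set.ofList (p ++ [c])).filter (fun x => (p ++ [c]).count x == 1) := by
        rw [hof]
        refine (List.filter_congr ?_).symm
        intro x _
        rw [hcount x]
        by_cases h : x = c
        · subst h; simp; omega
        · simp [h]
      have hdup' : ∀ x, x ∈ dup ↔ 2 ≤ (p ++ [c]).count x := by
        intro x; rw [hcount x]
        by_cases h : x = c
        · subst h; constructor
          · intro _; omega
          · intro _; exact hd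
        · simp [h, hdup x]
      have := ih (p ++ [c]) dup hdup'
      rw [honce]
      simpa [List.append_assoc] using this
    · rw [if_neg (by simpa [PySem.Set.contains_iff] using hd)]
      by_cases ho : c ∈ (PySem.Set.ofList p).filter (fun x => p.count x == 1)
      · -- second occurrence: move c from once to dup
        have h1 : p.count c = 1 := by
          have := (List.mem_filter.1 ho).2; simpa [beq_iff_eq] using this
        have hmem : c ∈ p := List.count_pos_iff.1 (by omega)
        rw [if_pos (by simpa [PySem.Set.contains_iff] using ho)]
        dsimp only
        have hof : PySem.Set.ofList (p ++ [c]) = PySem.Set.ofList p := by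
          rw [PySem.Set.ofList_append_singleton, PySem.Set.add,
            if_pos (by simpa [PySem.Set.contains_iff, PySem.Set.mem_ofList] using hmem)]
        have honce : PySem.Set.discard ((PySem.Set.ofList p).filter (fun x => p.count x == 1)) c
            = (PySem.Set.ofList (p ++ [c])).filter (fun x => (p ++ [c]).count x == 1) := by
          rw [hof, PySem.Set.discard, List.filter_filter]
          refine List.filter_congr ?_
          intro x _
          rw [hcount x]
          by_cases h : x = c
          · subst h; simp [h1]
          · simp [h]
        have hdup' : ∀ x, x ∈ PySem.Set.add dup c ↔ 2 ≤ (p ++ [c]).count x := by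
          intro x; rw [PySem.Set.mem_add, hcount x]
          by_cases h : x = c
          · subst h; simp [h1]
          · simp [h, hdup x]
        have := ih (p ++ [c]) (PySem.Set.add dup c) hdup'
        rw [honce]
        simpa [List.append_assoc] using this
      · -- first occurrence: add c to once
        have h0 : p.count c = 0 := by
          by_cases hm : c ∈ p
          · have hlt : p.count c < 2 := by
              by_contra h; exact hd ((hdup c).2 (by omega))
            have h1 : p.count c = 1 := by
              have := List.count_pos_iff.2 hm; omega
            exact absurd (List.mem_filter.2 ⟨(PySem.Set.mem_ofList _ _).2 hm, by simp [h1]⟩) ho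
          · exact List.count_eq_zero.2 hm
        have hnm : c ∉ p := List.count_eq_zero.1 h0
        rw [if_neg (by simpa [PySem.Set.contains_iff] using ho)]
        dsimp only
        have hof : PySem.Set.ofList (p ++ [c]) = PySem.Set.ofList p ++ [c] := by
          rw [PySem.Set.ofList_append_singleton, PySem.Set.add,
            if_neg (by simpa [PySem.Set.contains_iff, PySem.Set.mem_ofList] using hnm)]
        have honce : PySem.Set.add ((PySem.Set.ofList p).filter (fun x => p.count x == 1)) c
            = (PySem.Set.ofList (p ++ [c])).filter (fun x => (p ++ [c]).count x == 1) := by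
          rw [hof, PySem.Set.add, if_neg (by simpa [PySem.Set.contains_iff] using ho),
            List.filter_append]
          have : (List.filter (fun x => (p ++ [c]).count x == 1) [c]) = [c] := by
            simp [h0]
          rw [this]
          congr 1
          refine (List.filter_congr ?_).symm
          intro x hx
          have hxp : x ∈ p := (PySem.Set.mem_ofList _ _).1 hx
          have hxc : x ≠ c := fun h => hnm (h ▸ hxp)
          rw [hcount x]; simp [hxc]
        have hdup' : ∀ x, x ∈ dup ↔ 2 ≤ (p ++ [c]).count x := by
          intro x; rw [hcount x]
          by_cases h : x = c
          · subst h; simp [h0, hd]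
          · simp [h, hdup x]
        have := ih (p ++ [c]) dup hdup'
        rw [honce]
        simpa [List.append_assoc] using this

-- ===== VERDICT (by name: the statement is the Claim_ definition above) =====
theorem countUniqueChar_spec : Claim_equal_countUniqueChar := by
  intro string _
  unfold Spec_countUniqueChar countUniqueChar countUniqueChar_alt
  have h1 : (string.toList.foldl (fun d c =>
      let d' := if d.contains c then d else d.insert c (0 : Int)
      d'.insert c (d'.getD c 0 + 1)) PySem.Dict.empty) = PySem.Dict.counter string.toList := by
    rw [show (fun (d : PySem.Dict Char Int) (c : Char) =>
        let d' := if d.contains c then d else d.insert c (0 : Int)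
        d'.insert c (d'.getD c 0 + 1)) = fun d c => d.insert c (d.getD c 0 + 1)
      from funext fun d => funext fun c => stepA_eq d c]
    exact PySem.Dict.foldl_insert_getD_add_one_eq_counter string.toList
  have hB := B_inv string.toList [] [] (by intro c; simp)
  simp only [List.nil_append, PySem.Set.ofList_nil, List.count_nil, List.filter_nil] at hB
  simp only [h1, PySem.Dict.keys_counter, PySem.Dict.getD_counter, beq_iff_eq, Nat.cast_eq_one]
  rw [show ((PySem.Set.empty : PySem.Set Char), (PySem.Set.empty : PySem.Set Char))
      = (([] : List Char), ([] : List Char)) from rfl, hB, PySem.Set.len,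
    PySem.List.foldl_ite_add_one, ← List.countP_eq_length_filter]
  simp only [zero_add, Nat.cast_inj]
  exact List.countP_congr fun x _ => by simp
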